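-- pv_equiv track=rewrite | github.com/JPcketz/Frequency-AI | src/freqai/inference/symbolic_v0.py | _closest_pitch_in_pc
-- ===== SOURCE A (Python) =====
-- from typing import List, Tuple, Union, Dict
--
-- def _closest_pitch_in_pc(target: int, pc_set: List[int], lo: int, hi: int) -> int:
--     """Pick pitch (MIDI number) within [lo,hi] whose pitch-class is in pc_set and nearest to target."""
--     best = None
--     best_d = 10**9
--     for p in range(lo, hi+1):
--         if p % 12 in pc_set:
--             d = abs(p - target)
--             if d < best_d:
--                 best_d = d
--                 best = p
--     if best is None:
--         # fallback: clamp target to range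
--         return max(lo, min(hi, target))
--     return best
-- ===== SOURCE B (Python) =====
-- def _closest_pitch_in_pc(target, pc_set, lo, hi):
--     """Pick pitch (MIDI number) within [lo,hi] whose pitch-class is in pc_set and nearest to target."""
--     # expand the search radius d outward from target; the lower candidate is
--     # tried first so that the lower pitch wins distance ties.
--     pcs = set(pc_set)
--     d = max(0, lo - target, target - hi)  # smallest radius at which [lo,hi] is reachable
--     while target - d >= lo or target + d <= hi:
--         p = target - d
--         if lo <= p <= hi and p % 12 in pcs:
--             return p
--         p = target + d
--         if d > 0 and lo <= p <= hi and p % 12 in pcs: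
--             return p
--         d += 1
--     return max(lo, min(hi, target))
-- ===== Notes on version B (the rewrite author's own statement) =====
-- stated objective: alternative
-- what changed: Instead of scanning every pitch in [lo,hi] with a per-pitch list membership test, B expands a radius d outward from target (starting at the distance from target to the range), testing target-d before target+d so the lower pitch wins ties, against a precomputed set of pitch-classes, returning the first allowed in-range pitch and the clamp max(lo,min(hi,target)) when the sweep exhausts the range.
-- intended difference: On inputs where some pitch in [lo,hi] has its pitch-class in pc_set but every such pitch is at distance >= 10**9 from target, A's best_d=10**9 sentinel rejects every candidate and A falls back to the clamp max(lo,min(hi,target)) (generally not an allowed pitch), while B returns the nearest allowed pitch, which is what the docstring promises. — e.g. on _closest_pitch_in_pc(-1000000000, [5], 0, 11): A returns 0, B returns 5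
import Mathlib
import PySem

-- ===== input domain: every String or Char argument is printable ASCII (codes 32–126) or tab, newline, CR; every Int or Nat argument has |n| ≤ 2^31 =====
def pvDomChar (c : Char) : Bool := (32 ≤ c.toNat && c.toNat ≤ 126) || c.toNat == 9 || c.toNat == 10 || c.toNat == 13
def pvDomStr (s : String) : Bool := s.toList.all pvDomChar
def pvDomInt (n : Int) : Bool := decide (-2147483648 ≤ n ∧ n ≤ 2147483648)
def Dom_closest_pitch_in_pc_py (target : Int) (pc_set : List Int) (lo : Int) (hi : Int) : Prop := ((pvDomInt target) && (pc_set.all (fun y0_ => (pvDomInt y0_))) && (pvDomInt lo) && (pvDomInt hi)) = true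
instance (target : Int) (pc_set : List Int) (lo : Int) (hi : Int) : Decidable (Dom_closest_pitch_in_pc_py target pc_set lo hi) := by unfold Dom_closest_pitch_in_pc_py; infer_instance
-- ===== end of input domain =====

-- B replaces A's full scan of [lo,hi] (list membership per pitch) with an expanding-radius
-- search from target against a precomputed pitch-class set; intended difference stated at D_ below.

-- ===== PORT A =====
-- loop body of A's 'for p in range(lo, hi+1)': state is (best, best_d)
def stepA (target : Int) (pc_set : List Int) (st : Option Int × Int) (p : Int) : Option Int × Int :=
  if pc_set.contains (PySem.Int.mod p 12) then
    -- d = abs(p - target); if d < best_d: best_d, best = d, p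
    let d := |p - target|
    if d < st.2 then (some p, d) else st
  else st

def closest_pitch_in_pc_py (target : Int) (pc_set : List Int) (lo : Int) (hi : Int) : Int :=
  -- best = None; best_d = 10**9; for p in range(lo, hi+1): …
  let best : Option Int := none
  let best_d : Int := 10 ^ 9
  let r := (PySem.List.pyRange lo (hi + 1) 1).foldl (stepA target pc_set) (best, best_d)
  match r.1 with
  | none => max lo (min hi target)   -- fallback: clamp target to range
  | some b => b

-- ===== PORT B =====
-- B's while-loop: radius d grows; lower candidate target-d tried first.
-- fuel is a totality device only: it is chosen large enough that the loop's own
-- exit test 'not (target - d >= lo or target + d <= hi)' always fires first.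
def bStep (target : Int) (pc_set : List Int) (lo : Int) (hi : Int) : Nat → Int → Int
  | 0, _ => max lo (min hi target)
  | Nat.succ n, d =>
    if target - d ≥ lo ∨ target + d ≤ hi then
      if lo ≤ target - d ∧ target - d ≤ hi ∧ pc_set.contains (PySem.Int.mod (target - d) 12) then
        target - d
      else if 0 < d ∧ lo ≤ target + d ∧ target + d ≤ hi ∧ pc_set.contains (PySem.Int.mod (target + d) 12) then
        target + d
      else
        bStep target pc_set lo hi n (d + 1)
    else
      max lo (min hi target)

def closest_pitch_in_pc_py_alt (target : Int) (pc_set : List Int) (lo : Int) (hi : Int) : Int :=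
  -- pcs = set(pc_set); d = max(0, lo - target, target - hi); while …
  bStep target (PySem.Set.ofList pc_set) lo hi ((max (target - lo) (hi - target)).toNat + 2)
    (max (max 0 (lo - target)) (target - hi))

-- ===== PRECONDITION & SPEC =====
-- On inputs where a pitch of an allowed class exists in [lo,hi] but every such pitch is at
-- distance ≥ 10^9 from target (and the clamped target's own pitch-class is not allowed),
-- A's best_d = 10**9 sentinel rejects all candidates and A returns the clamp
-- max(lo, min(hi, target)), whose pitch-class is NOT in pc_set, while B returns the nearest
-- allowed pitch — which is what the function's docstring promises.
-- noPC pcs a b: no pitch p in [a,b] has its pitch-class (Python p % 12) in pcs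
def noPC (pcs : List Int) (a b : Int) : Prop := ∀ c ∈ pcs, b < a + (c - a) % 12 ∨ c % 12 ≠ c

-- an allowed pitch exists in [lo,hi], yet none lies in the window of pitches within
-- 10^9 - 1 of target (clamped to the range, and collapsed onto the clamp point when the
-- window misses the range entirely): exactly there A's best_d = 10**9 sentinel makes A
-- fall back to a clamp whose pitch-class is not allowed, while B returns an allowed pitch.
def D_closest_pitch_in_pc_py (target : Int) (pc_set : List Int) (lo : Int) (hi : Int) : Prop :=
  ¬ noPC pc_set lo hi ∧ noPC pc_set (lo ⊔ (target - 999999999) ⊓ hi) (hi ⊓ (target + 999999999) ⊔ lo)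

instance (target : Int) (pc_set : List Int) (lo : Int) (hi : Int) : Decidable (D_closest_pitch_in_pc_py target pc_set lo hi) := by unfold D_closest_pitch_in_pc_py noPC; infer_instance

def Spec_closest_pitch_in_pc_py (target : Int) (pc_set : List Int) (lo : Int) (hi : Int) (out : Int) : Prop := ¬ D_closest_pitch_in_pc_py target pc_set lo hi → out = closest_pitch_in_pc_py_alt target pc_set lo hi
instance (target : Int) (pc_set : List Int) (lo : Int) (hi : Int) (out : Int) : Decidable (Spec_closest_pitch_in_pc_py target pc_set lo hi out) := by unfold Spec_closest_pitch_in_pc_py; infer_instance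

def pvDiffWitness_closest_pitch_in_pc_py : Int × List Int × Int × Int := (-1000000000, [5], 0, 11)
def pvDiffWitnessOut_closest_pitch_in_pc_py : Int × Int := (0, 5)

-- ===== CLAIM (what is proved, stated in full; the proofs are below) =====
def Claim_unchanged_closest_pitch_in_pc_py : Prop := ∀ (target : Int) (pc_set : List Int) (lo : Int) (hi : Int), Dom_closest_pitch_in_pc_py target pc_set lo hi → Spec_closest_pitch_in_pc_py target pc_set lo hi (closest_pitch_in_pc_py target pc_set lo hi)
def Claim_changed_closest_pitch_in_pc_py : Prop := Dom_closest_pitch_in_pc_py (pvDiffWitness_closest_pitch_in_pc_py.1) (pvDiffWitness_closest_pitch_in_pc_py.2.1) (pvDiffWitness_closest_pitch_in_pc_py.2.2.1) (pvDiffWitness_closest_pitch_in_pc_py.2.2.2) ∧ D_closest_pitch_in_pc_py (pvDiffWitness_closest_pitch_in_pc_py.1) (pvDiffWitness_closest_pitch_in_pc_py.2.1) (pvDiffWitness_closest_pitch_in_pc_py.2.2.1) (pvDiffWitness_closest_pitch_in_pc_py.2.2.2) ∧ closest_pitch_in_pc_py (pvDiffWitness_closest_pitch_in_pc_py.1) (pvDiffWitness_closest_pitch_in_pc_py.2.1)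 (pvDiffWitness_closest_pitch_in_pc_py.2.2.1) (pvDiffWitness_closest_pitch_in_pc_py.2.2.2) = pvDiffWitnessOut_closest_pitch_in_pc_py.1 ∧ closest_pitch_in_pc_py_alt (pvDiffWitness_closest_pitch_in_pc_py.1) (pvDiffWitness_closest_pitch_in_pc_py.2.1) (pvDiffWitness_closest_pitch_in_pc_py.2.2.1) (pvDiffWitness_closest_pitch_in_pc_py.2.2.2) = pvDiffWitnessOut_closest_pitch_in_pc_py.2 ∧ pvDiffWitnessOut_closest_pitch_in_pc_py.1 ≠ pvDiffWitnessOut_closest_pitch_in_pc_py.2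

def Claim_exact_closest_pitch_in_pc_py : Prop := ∀ (target : Int) (pc_set : List Int) (lo : Int) (hi : Int), Dom_closest_pitch_in_pc_py target pc_set lo hi → D_closest_pitch_in_pc_py target pc_set lo hi → closest_pitch_in_pc_py target pc_set lo hi ≠ closest_pitch_in_pc_py_alt target pc_set lo hi

-- ===== LEMMAS AND PROOFS =====

-- a pitch p is a legal answer: in range and its pitch-class is allowed
def VP (pc_set : List Int) (lo hi p : Int) : Prop := lo ≤ p ∧ p ≤ hi ∧ (p % 12) ∈ pc_set

-- the (unique) pitch both programs aim for: minimal distance, lower pitch on ties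
def IsBest (target : Int) (pc_set : List Int) (lo hi p : Int) : Prop :=
  VP pc_set lo hi p ∧ ∀ q, VP pc_set lo hi q →
    |p - target| < |q - target| ∨ (|p - target| = |q - target| ∧ p ≤ q)

theorem IsBest_unique (target : Int) (pc_set : List Int) (lo hi p q : Int)
    (hp : IsBest target pc_set lo hi p) (hq : IsBest target pc_set lo hi q) : p = q := by
  rcases hp with ⟨hvp, hp⟩
  rcases hq with ⟨hvq, hq⟩
  rcases hp q hvq with h1 | ⟨h1, h2⟩ <;> rcases hq p hvp with h3 | ⟨h3, h4⟩ <;> omega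

theorem contains_iff_mem_pc (pc_set : List Int) (p : Int) :
    pc_set.contains (PySem.Int.mod p 12) = true ↔ (p % 12) ∈ pc_set := by
  rw [PySem.Int.mod_eq_emod_of_pos (by omega)]
  simp

-- Source B's pcs = set(pc_set) holds the same pitch-classes as pc_set
theorem VP_ofList (l : List Int) (lo hi p : Int) :
    VP (PySem.Set.ofList l) lo hi p ↔ VP l lo hi p := by
  unfold VP
  rw [PySem.Set.mem_ofList]

theorem IsBest_ofList (target : Int) (l : List Int) (lo hi p : Int) :
    IsBest target (PySem.Set.ofList l) lo hi p ↔ IsBest target l lo hi p := by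
  unfold IsBest
  simp only [VP_ofList]

-- ---- B-side characterisation ----

theorem bStep_spec (target : Int) (pc_set : List Int) (lo hi : Int) :
    ∀ (fuel : Nat) (d : Int), 0 ≤ d →
    (max (target - lo) (hi - target) + 1 - d).toNat < fuel →
    (∀ q, VP pc_set lo hi q → d ≤ |q - target|) →
    ((∃ q, VP pc_set lo hi q) → IsBest target pc_set lo hi (bStep target pc_set lo hi fuel d)) ∧
    ((¬ ∃ q, VP pc_set lo hi q) → bStep target pc_set lo hi fuel d = max lo (min hi target)) := by
  intro fuel
  induction fuel with
  | zero => intro d _ hf _; omega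
  | succ n ih =>
    intro d hd hf hno
    show _ ∧ _
    rw [bStep]
    by_cases hc : target - d ≥ lo ∨ target + d ≤ hi
    · rw [if_pos hc]
      by_cases h1 : lo ≤ target - d ∧ target - d ≤ hi ∧ pc_set.contains (PySem.Int.mod (target - d) 12)
      · rw [if_pos h1]
        have hv1 : VP pc_set lo hi (target - d) :=
          ⟨h1.1, h1.2.1, (contains_iff_mem_pc pc_set (target - d)).mp h1.2.2⟩
        constructor
        · intro _
          refine ⟨hv1, fun q hq => ?_⟩
          have := hno q hq
          rcases abs_cases (target - d - target) with ⟨e1, e2⟩ | ⟨e1, e2⟩ <;>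
            rcases abs_cases (q - target) with ⟨f1, f2⟩ | ⟨f1, f2⟩ <;> omega
        · intro hne; exact absurd ⟨_, hv1⟩ hne
      · rw [if_neg h1]
        by_cases h2 : 0 < d ∧ lo ≤ target + d ∧ target + d ≤ hi ∧ pc_set.contains (PySem.Int.mod (target + d) 12)
        · rw [if_pos h2]
          have hv2 : VP pc_set lo hi (target + d) :=
            ⟨h2.2.1, h2.2.2.1, (contains_iff_mem_pc pc_set (target + d)).mp h2.2.2.2⟩
          constructor
          · intro _
            refine ⟨hv2, fun q hq => ?_⟩
            have hq' := hno q hq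
            by_cases hqe : q = target - d
            · exfalso
              apply h1
              subst hqe
              exact ⟨hq.1, hq.2.1, (contains_iff_mem_pc pc_set (target - d)).mpr hq.2.2⟩
            · rcases abs_cases (target + d - target) with ⟨e1, e2⟩ | ⟨e1, e2⟩ <;>
                rcases abs_cases (q - target) with ⟨f1, f2⟩ | ⟨f1, f2⟩ <;> omega
          · intro hne; exact absurd ⟨_, hv2⟩ hne
        · rw [if_neg h2]
          apply ih (d + 1) (by omega) (by omega)
          intro q hq
          have hq' := hno q hq
          by_cases hqe : |q - target| = d
          · exfalso
            have : q = target - d ∨ q = target + d := by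
              rcases abs_cases (q - target) with ⟨f1, f2⟩ | ⟨f1, f2⟩ <;> omega
            rcases this with rfl | rfl
            · exact h1 ⟨hq.1, hq.2.1, (contains_iff_mem_pc pc_set _).mpr hq.2.2⟩
            · by_cases hd0 : 0 < d
              · exact h2 ⟨hd0, hq.1, hq.2.1, (contains_iff_mem_pc pc_set _).mpr hq.2.2⟩
              · have hd0' : d = 0 := by omega
                subst hd0'
                obtain ⟨ha, hb, hcm⟩ := hq
                exact h1 ⟨by omega, by omega, (contains_iff_mem_pc pc_set _).mpr (by simpa using hcm)⟩
          · omega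
    · rw [if_neg hc]
      constructor
      · intro ⟨q, hq⟩
        exfalso
        have := hno q hq
        rcases abs_cases (q - target) with ⟨f1, f2⟩ | ⟨f1, f2⟩ <;>
          rcases hq with ⟨hq1, hq2, _⟩ <;> omega
      · intro _; rfl

theorem alt_spec (target : Int) (pc_set : List Int) (lo hi : Int) :
    ((∃ q, VP pc_set lo hi q) → IsBest target pc_set lo hi (closest_pitch_in_pc_py_alt target pc_set lo hi)) ∧
    ((¬ ∃ q, VP pc_set lo hi q) → closest_pitch_in_pc_py_alt target pc_set lo hi = max lo (min hi target)) := by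
  unfold closest_pitch_in_pc_py_alt
  have h := bStep_spec target (PySem.Set.ofList pc_set) lo hi
      ((max (target - lo) (hi - target)).toNat + 2) (max (max 0 (lo - target)) (target - hi))
      (by omega) (by omega) (by
        intro q hq
        rcases hq with ⟨h1, h2, _⟩
        rcases abs_cases (q - target) with ⟨f1, f2⟩ | ⟨f1, f2⟩ <;> omega)
  constructor
  · rintro ⟨q, hq⟩
    exact (IsBest_ofList target pc_set lo hi _).mp
      (h.1 ⟨q, (VP_ofList pc_set lo hi q).mpr hq⟩)
  · intro hne
    exact h.2 fun ⟨q, hq⟩ => hne ⟨q, (VP_ofList pc_set lo hi q).mp hq⟩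

-- ---- A-side characterisation ----

-- invariant for A's fold after the pitches below k have been processed
def InvA (target : Int) (pc_set : List Int) (lo hi k : Int) (st : Option Int × Int) : Prop :=
  (∀ q, VP pc_set lo hi q → q < k → st.2 ≤ |q - target|) ∧
  (st.1 = none → st.2 = 1000000000) ∧
  (∀ m, st.1 = some m → st.2 = |m - target| ∧ st.2 < 1000000000 ∧ VP pc_set lo hi m ∧ m < k ∧
      ∀ q, VP pc_set lo hi q → q < k → |q - target| = st.2 → m ≤ q)

theorem foldA_inv (target : Int) (pc_set : List Int) (lo hi : Int) :
    ∀ (n : Nat) (k : Int) (st : Option Int × Int), (hi + 1 - k).toNat = n → lo ≤ k →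
    InvA target pc_set lo hi k st →
    InvA target pc_set lo hi (hi + 1)
      (((PySem.List.pyRange k (hi + 1) 1).foldl (stepA target pc_set) st)) := by
  intro n
  induction n using Nat.strong_induction_on with
  | _ n ih =>
    intro k st hn hk hinv
    obtain ⟨i1, i2, i3⟩ := hinv
    by_cases hend : hi + 1 ≤ k
    · rw [PySem.List.pyRange_one_eq_nil hend]
      simp only [List.foldl_nil]
      refine ⟨fun q hq hq' => i1 q hq (by omega), i2, fun m hm => ?_⟩
      obtain ⟨a1, a2, a3, a4, a5⟩ := i3 m hm
      exact ⟨a1, a2, a3, by have := a3.2.1; omega, fun q hq hq' => a5 q hq (by omega)⟩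
    · rw [PySem.List.pyRange_one_cons (by omega)]
      simp only [List.foldl_cons]
      apply ih (hi + 1 - (k + 1)).toNat (by omega) (k + 1) _ rfl (by omega)
      -- show the invariant survives one step at pitch k
      unfold stepA
      by_cases hcl : pc_set.contains (PySem.Int.mod k 12)
      · rw [if_pos hcl]
        show InvA target pc_set lo hi (k + 1)
          (if |k - target| < st.2 then (some k, |k - target|) else st)
        have hvk : (k % 12) ∈ pc_set := (contains_iff_mem_pc pc_set k).mp hcl
        have hbd : st.1 = none ∨ ∃ m, st.1 = some m := by
          cases h : st.1 with
          | none => exact Or.inl rfl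
          | some m => exact Or.inr ⟨m, rfl⟩
        have hstlt : st.2 ≤ 1000000000 := by
          rcases hbd with h | ⟨m, h⟩
          · have := i2 h; omega
          · exact le_of_lt (i3 m h).2.1
        by_cases hlt : |k - target| < st.2
        · rw [if_pos hlt]
          have hlt9 : |k - target| < 1000000000 := by
            rcases hbd with h | ⟨m, h⟩
            · have := i2 h; omega
            · have := (i3 m h).2.1; omega
          refine ⟨fun q hq hq' => ?_, by simp, fun m hm => ?_⟩
          · by_cases hqk : q = k
            · subst hqk; simp
            · have := i1 q hq (by omega); simp; omega
          · simp at hm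
            subst hm
            refine ⟨rfl, by simpa using hlt9, ⟨by omega, by omega, hvk⟩, by omega,
              fun q hq hq' he => ?_⟩
            by_cases hqk : q = k
            · omega
            · have := i1 q hq (by omega)
              simp at he
              omega
        · rw [if_neg hlt]
          refine ⟨fun q hq hq' => ?_, i2, fun m hm => ?_⟩
          · by_cases hqk : q = k
            · subst hqk; omega
            · exact i1 q hq (by omega)
          · obtain ⟨a1, a2, a3, a4, a5⟩ := i3 m hm
            refine ⟨a1, a2, a3, by omega, fun q hq hq' he => ?_⟩
            by_cases hqk : q = k
            · omega
            · exact a5 q hq (by omega) he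
      · rw [if_neg hcl]
        refine ⟨fun q hq hq' => ?_, i2, fun m hm => ?_⟩
        · by_cases hqk : q = k
          · subst hqk
            exact absurd ((contains_iff_mem_pc pc_set _).mpr hq.2.2) (by simpa using hcl)
          · exact i1 q hq (by omega)
        · obtain ⟨a1, a2, a3, a4, a5⟩ := i3 m hm
          refine ⟨a1, a2, a3, by omega, fun q hq hq' he => ?_⟩
          by_cases hqk : q = k
          · subst hqk
            exact absurd ((contains_iff_mem_pc pc_set _).mpr hq.2.2) (by simpa using hcl)
          · exact a5 q hq (by omega) he

-- A returns the true best pitch when some allowed pitch is within 10^9 of target,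
-- and the clamp when every allowed pitch is at distance ≥ 10^9 (or none exists)
theorem a_spec (target : Int) (pc_set : List Int) (lo hi : Int) :
    ((∃ q, VP pc_set lo hi q ∧ |q - target| < 1000000000) →
        IsBest target pc_set lo hi (closest_pitch_in_pc_py target pc_set lo hi)) ∧
    ((∀ q, VP pc_set lo hi q → 1000000000 ≤ |q - target|) →
        closest_pitch_in_pc_py target pc_set lo hi = max lo (min hi target)) := by
  have hinv := foldA_inv target pc_set lo hi (hi + 1 - lo).toNat lo (none, 10 ^ 9) rfl
      (le_refl lo) ⟨fun q hq hq' => by rcases hq with ⟨h1, _, _⟩; omega, fun _ => by norm_num,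
        fun m hm => by simp at hm⟩
  simp only [closest_pitch_in_pc_py]
  set r := (PySem.List.pyRange lo (hi + 1) 1).foldl (stepA target pc_set) ((none : Option Int), (10 ^ 9 : Int)) with hr
  obtain ⟨i1, i2, i3⟩ := hinv
  constructor
  · rintro ⟨q, hq, hqn⟩
    cases hst : r.1 with
    | none =>
      exfalso
      have := i2 hst
      have := i1 q hq (by rcases hq with ⟨_, h, _⟩; omega)
      omega
    | some m =>
      show IsBest target pc_set lo hi m
      obtain ⟨a1, a2, a3, a4, a5⟩ := i3 m hst
      refine ⟨a3, fun q' hq' => ?_⟩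
      have hle := i1 q' hq' (by rcases hq' with ⟨_, h, _⟩; omega)
      by_cases he : |q' - target| = r.2
      · exact Or.inr ⟨by omega, a5 q' hq' (by rcases hq' with ⟨_, h, _⟩; omega) he⟩
      · exact Or.inl (by omega)
  · intro hfar
    cases hst : r.1 with
    | none => rfl
    | some m =>
      exfalso
      obtain ⟨a1, a2, a3, a4, a5⟩ := i3 m hst
      have := hfar m a3
      omega

-- ---- translating D_'s closed form ----

theorem noPC_iff (pcs : List Int) (a b : Int) :
    noPC pcs a b ↔ ¬ ∃ p, a ≤ p ∧ p ≤ b ∧ (p % 12) ∈ pcs := by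
  unfold noPC
  constructor
  · rintro h ⟨p, h1, h2, h3⟩
    rcases h (p % 12) h3 with hc | hc <;> omega
  · intro h c hc
    by_contra hn
    simp only [not_or, not_lt] at hn
    exact h ⟨a + (c - a) % 12, by omega, by omega, by
      rw [show (a + (c - a) % 12) % 12 = c by omega]; exact hc⟩

theorem exists_vp_iff (pc_set : List Int) (lo hi : Int) :
    ¬ noPC pc_set lo hi ↔ ∃ p, VP pc_set lo hi p := by
  rw [noPC_iff, not_not]
  unfold VP
  rfl

-- the clamp is itself the best pitch when it is allowed and every allowed pitch is far
theorem clamp_best (target : Int) (pc_set : List Int) (lo hi : Int)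
    (hex : ∃ p, VP pc_set lo hi p)
    (hfar : ∀ q, VP pc_set lo hi q → 1000000000 ≤ |q - target|)
    (hcl : ((max lo (min hi target)) % 12) ∈ pc_set) :
    IsBest target pc_set lo hi (max lo (min hi target)) := by
  rcases hex with ⟨p0, hp0⟩
  have hlohi : lo ≤ hi := by rcases hp0 with ⟨h1, h2, _⟩; omega
  have hvcl : VP pc_set lo hi (max lo (min hi target)) := ⟨by omega, by omega, hcl⟩
  have hout : target < lo ∨ hi < target := by
    by_contra h
    simp only [not_or, not_lt] at h
    have h0 := hfar _ hvcl
    rw [show max lo (min hi target) = target by omega] at h0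
    simp at h0
  refine ⟨hvcl, fun q hq => ?_⟩
  rcases hq with ⟨h1, h2, _⟩
  rcases hout with h | h <;>
    [ (have : max lo (min hi target) = lo := by omega);
      (have : max lo (min hi target) = hi := by omega)] <;>
    rw [this] <;>
    rcases abs_cases (q - target) with ⟨f1, f2⟩ | ⟨f1, f2⟩ <;>
    first
      | (rcases abs_cases (lo - target) with ⟨g1, g2⟩ | ⟨g1, g2⟩ <;> omega)
      | (rcases abs_cases (hi - target) with ⟨g1, g2⟩ | ⟨g1, g2⟩ <;> omega)

-- ===== VERDICT (by name: the statement is the Claim_ definition above) =====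
theorem closest_pitch_in_pc_py_spec : Claim_unchanged_closest_pitch_in_pc_py := by
  intro target pc_set lo hi _ hnd
  by_cases hex : ∃ p, VP pc_set lo hi p
  · by_cases hnear : ∃ p, VP pc_set lo hi p ∧ |p - target| < 1000000000
    · exact IsBest_unique target pc_set lo hi _ _
        ((a_spec target pc_set lo hi).1 hnear) ((alt_spec target pc_set lo hi).1 hex)
    · -- every allowed pitch is ≥ 10^9 away and (from ¬D) the window, hence the clamp, is allowed
      have hfar : ∀ q, VP pc_set lo hi q → 1000000000 ≤ |q - target| := by
        intro q hq
        by_contra h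
        exact hnear ⟨q, hq, by omega⟩
      have hlohi : lo ≤ hi := by obtain ⟨p, h1, h2, _⟩ := hex; omega
      have hw : ¬ noPC pc_set (lo ⊔ (target - 999999999) ⊓ hi) (hi ⊓ (target + 999999999) ⊔ lo) :=
        fun h => hnd ⟨(exists_vp_iff pc_set lo hi).mpr hex, h⟩
      rw [noPC_iff, not_not] at hw
      obtain ⟨p, hpA, hpB, hpc⟩ := hw
      have hvp : VP pc_set lo hi p := ⟨by omega, by omega, hpc⟩
      have hf := hfar p hvp
      have hpcl : p = max lo (min hi target) := by
        rcases abs_cases (p - target) with ⟨f1, f2⟩ | ⟨f1, f2⟩ <;> omega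
      rw [(a_spec target pc_set lo hi).2 hfar]
      exact IsBest_unique target pc_set lo hi _ _
        (clamp_best target pc_set lo hi hex hfar (hpcl ▸ hpc))
        ((alt_spec target pc_set lo hi).1 hex)
  · have hfar : ∀ q, VP pc_set lo hi q → 1000000000 ≤ |q - target| := by
      intro q hq; exact absurd ⟨q, hq⟩ hex
    rw [(a_spec target pc_set lo hi).2 hfar, (alt_spec target pc_set lo hi).2 hex]

theorem closest_pitch_in_pc_py_changed : Claim_changed_closest_pitch_in_pc_py := by
  unfold Claim_changed_closest_pitch_in_pc_py
  refine ⟨by decide, by decide, by decide, ?_, by decide⟩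
  exact IsBest_unique (-1000000000) [5] 0 11 _ 5
    ((alt_spec (-1000000000) [5] 0 11).1 ⟨5, ⟨by omega, by omega, by norm_num⟩⟩)
    (by
      refine ⟨⟨by omega, by omega, by norm_num⟩, fun q hq => ?_⟩
      rcases hq with ⟨h1, h2, h3⟩
      simp at h3
      have hq5 : q = 5 := by omega
      subst hq5
      exact Or.inr ⟨rfl, le_refl _⟩)

theorem closest_pitch_in_pc_py_tight : Claim_exact_closest_pitch_in_pc_py := by
  intro target pc_set lo hi _ hd
  obtain ⟨hc1, hw⟩ := hd
  have hex := (exists_vp_iff pc_set lo hi).mp hc1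
  have hlohi : lo ≤ hi := by obtain ⟨p, h1, h2, _⟩ := hex; omega
  rw [noPC_iff] at hw
  have hfar : ∀ q, VP pc_set lo hi q → 1000000000 ≤ |q - target| := by
    intro q hq
    obtain ⟨h1, h2, h3⟩ := hq
    by_contra h
    apply hw
    refine ⟨q, ?_, ?_, h3⟩ <;>
      rcases abs_cases (q - target) with ⟨f1, f2⟩ | ⟨f1, f2⟩ <;> omega
  rw [(a_spec target pc_set lo hi).2 hfar]
  intro he
  have hb := (alt_spec target pc_set lo hi).1 hex
  apply hw
  refine ⟨closest_pitch_in_pc_py_alt target pc_set lo hi, ?_, ?_, hb.1.2.2⟩ <;>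
    rw [← he] <;> omega
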